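-- pv_equiv track=rewrite | github.com/anthliu/PSGI | psgi/envs/ai2thor/entity_constants.py | construct_compat_features
-- ===== SOURCE A (Python) =====
-- def construct_compat_features(fp_to_entity, fp_to_feature_positives, compat_clusters):
--   comp_features = {}
--   for group, (c_objs, c_receps) in enumerate(compat_clusters):
--     feat_name = f'f_PlaceGroup{group}'
--     positive_ents = set(c_objs)
--     positive_ents.update(c_receps)
--     comp_features[feat_name] = positive_ents
--   fp_to_compat = {}
--   for floorplan, entities in fp_to_entity.items():
--     fp_to_compat[floorplan] = {}
--     for entity in entities:
--       for feat_name, ents in comp_features.items():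
--         obj_type = entity.split('_')[-1]# XXX hack, obj name stored as id_type
--         if obj_type in ents:
--           fp_to_compat[floorplan].setdefault(feat_name, []).append(entity)
--
--   return list(sorted(comp_features.keys())), fp_to_compat
-- ===== SOURCE B (Python) =====
-- def construct_compat_features(fp_to_entity, fp_to_feature_positives, compat_clusters):
--   # Alternative decomposition: invert the clusters once into an obj_type -> feature-name
--   # index, then build each floorplan's dict declaratively: key order by first appearance,
--   # values by filtering the entity list.
--   feat_names = ['f_PlaceGroup%d' % g for g in range(len(compat_clusters))]
--   type_feats = {}
--   for name, (c_objs, c_receps) in zip(feat_names, compat_clusters):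
--     for t in dict.fromkeys(c_objs + c_receps):
--       type_feats.setdefault(t, []).append(name)
--   fp_to_compat = {}
--   for floorplan, entities in fp_to_entity.items():
--     pairs = [(e, type_feats.get(e.split('_')[-1], [])) for e in entities]
--     order = list(dict.fromkeys(f for _, fs in pairs for f in fs))
--     fp_to_compat[floorplan] = {f: [e for e, fs in pairs if f in fs] for f in order}
--   return sorted(feat_names), fp_to_compat
-- ===== Notes on version B (the rewrite author's own statement) =====
-- stated objective: alternative
-- what changed: B inverts the clusters once into an obj_type -> feature-name index and builds each floorplan's dict declaratively (key order by first appearance, values by filtering the entity list), instead of A's per-entity rescan of every cluster's member set with incremental setdefault/append; it trades A's incremental dict mutation for staged index-then-filter passes.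
import Mathlib
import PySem

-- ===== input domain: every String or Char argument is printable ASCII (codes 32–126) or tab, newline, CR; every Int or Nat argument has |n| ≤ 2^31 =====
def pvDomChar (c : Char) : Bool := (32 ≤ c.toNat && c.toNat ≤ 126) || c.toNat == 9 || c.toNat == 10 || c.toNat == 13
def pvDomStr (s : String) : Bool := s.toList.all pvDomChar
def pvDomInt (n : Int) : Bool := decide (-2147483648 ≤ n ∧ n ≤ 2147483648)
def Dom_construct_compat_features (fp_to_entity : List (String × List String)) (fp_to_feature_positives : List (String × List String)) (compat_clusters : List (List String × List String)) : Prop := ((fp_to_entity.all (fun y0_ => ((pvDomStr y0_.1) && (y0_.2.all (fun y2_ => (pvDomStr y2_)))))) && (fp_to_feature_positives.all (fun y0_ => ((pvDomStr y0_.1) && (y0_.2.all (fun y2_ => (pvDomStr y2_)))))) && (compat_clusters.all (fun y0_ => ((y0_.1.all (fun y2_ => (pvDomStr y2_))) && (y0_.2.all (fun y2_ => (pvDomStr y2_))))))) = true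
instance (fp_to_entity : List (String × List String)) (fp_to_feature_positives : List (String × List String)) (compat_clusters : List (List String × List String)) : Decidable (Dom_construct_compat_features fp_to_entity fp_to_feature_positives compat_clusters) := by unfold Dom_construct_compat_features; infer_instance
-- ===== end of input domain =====

-- B inverts the clusters once into an obj_type -> feature-name index and builds each
-- floorplan's dict declaratively (key order by first appearance, values by filtering),
-- replacing A's per-entity rescan of every cluster set (objective: alternative).

-- entity.split('_')[-1] (split('_') never returns an empty list, so the [] / "" defaults are never used)
def pvObjType (entity : String) : String :=
  PySem.List.pyGetD ((PySem.Str.split? entity "_").getD []) (-1) ""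

-- ===== PORT A =====
-- first loop of A: comp_features[f'f_PlaceGroup{group}'] = set(c_objs) | set updated with c_receps
def pvA_compFeatures (compat_clusters : List (List String × List String)) : PySem.Dict String (PySem.Set String) :=
  (PySem.List.enumerate compat_clusters 0).foldl
    (fun d gp => d.insert ("f_PlaceGroup" ++ PySem.Int.toStr gp.1)
      (PySem.Set.update (PySem.Set.ofList gp.2.1) gp.2.2)) PySem.Dict.empty

-- A's inner two loops for one floorplan: for entity …: for feat_name, ents …: if obj_type in ents: setdefault/append
def pvA_floorplanCompat (cf : List (String × PySem.Set String)) (entities : List String) : PySem.Dict String (List String) :=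
  entities.foldl (fun inner entity =>
    cf.foldl (fun inner p =>
      if PySem.Set.contains p.2 (pvObjType entity) then inner.modify p.1 [] (· ++ [entity]) else inner) inner)
    PySem.Dict.empty

def construct_compat_features (fp_to_entity : List (String × List String)) (fp_to_feature_positives : List (String × List String)) (compat_clusters : List (List String × List String)) : List String × (List (String × List (String × List String))) :=
  let comp_features := pvA_compFeatures compat_clusters
  (PySem.List.sorted comp_features.keys (fun x => x) false,
   fp_to_entity.foldl (fun acc fe => acc ++ [(fe.1, (pvA_floorplanCompat comp_features.items fe.2).items)]) [])

-- ===== PORT B =====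
-- feat_names = ['f_PlaceGroup%d' % g for g in range(len(compat_clusters))]
def pvB_featNames (compat_clusters : List (List String × List String)) : List String :=
  (PySem.List.pyRange 0 compat_clusters.length).map (fun g => "f_PlaceGroup" ++ PySem.Int.toStr g)

-- for name, (c_objs, c_receps) in zip(feat_names, compat_clusters): for t in dict.fromkeys(c_objs + c_receps): type_feats.setdefault(t, []).append(name)
def pvB_typeFeats (compat_clusters : List (List String × List String)) : PySem.Dict String (List String) :=
  ((pvB_featNames compat_clusters).zip compat_clusters).foldl
    (fun tf nc => (PySem.List.dedup (nc.2.1 ++ nc.2.2)).foldl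
      (fun tf t => tf.modify t [] (· ++ [nc.1])) tf)
    PySem.Dict.empty

-- pairs = [(e, type_feats.get(e.split('_')[-1], [])) for e in entities]
def pvB_pairs (tf : PySem.Dict String (List String)) (entities : List String) : List (String × List String) :=
  entities.map (fun e => (e, tf.getD (pvObjType e) []))

-- order = list(dict.fromkeys(f for _, fs in pairs for f in fs)); {f: [e for e, fs in pairs if f in fs] for f in order}
def pvB_compat (ps : List (String × List String)) : PySem.Dict String (List String) :=
  (PySem.List.dedup (ps.flatMap (fun p => p.2))).foldl
    (fun d f => d.insert f ((ps.filter (fun p => p.2.contains f)).map (fun p => p.1)))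
    PySem.Dict.empty

def construct_compat_features_alt (fp_to_entity : List (String × List String)) (fp_to_feature_positives : List (String × List String)) (compat_clusters : List (List String × List String)) : List String × (List (String × List (String × List String))) :=
  let tf := pvB_typeFeats compat_clusters
  (PySem.List.sorted (pvB_featNames compat_clusters) (fun x => x) false,
   fp_to_entity.map (fun fe => (fe.1, (pvB_compat (pvB_pairs tf fe.2)).items)))

-- ===== PRECONDITION & SPEC =====
def Spec_construct_compat_features (fp_to_entity : List (String × List String)) (fp_to_feature_positives : List (String × List String)) (compat_clusters : List (List String × List String)) (out : List String × (List (String × List (String × List String)))) : Prop := out = construct_compat_features_alt fp_to_entity fp_to_feature_positives compat_clusters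
instance (fp_to_entity : List (String × List String)) (fp_to_feature_positives : List (String × List String)) (compat_clusters : List (List String × List String)) (out : List String × (List (String × List (String × List String)))) : Decidable (Spec_construct_compat_features fp_to_entity fp_to_feature_positives compat_clusters out) := by unfold Spec_construct_compat_features; infer_instance

-- ===== CLAIM (what is proved, stated in full; the proofs are below) =====
def Claim_equal_construct_compat_features : Prop := ∀ (fp_to_entity : List (String × List String)) (fp_to_feature_positives : List (String × List String)) (compat_clusters : List (List String × List String)), Dom_construct_compat_features fp_to_entity fp_to_feature_positives compat_clusters → Spec_construct_compat_features fp_to_entity fp_to_feature_positives compat_clusters (construct_compat_features fp_to_entity fp_to_feature_positives compat_clusters)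

-- ===== LEMMAS AND PROOFS =====

-- ---- str(n) is injective (needed: the feature names f_PlaceGroup{g} are pairwise distinct) ----

lemma pv_core_succ (f n : Nat) (ds : List Char) :
    Nat.toDigitsCore 10 (f + 1) n ds =
      if n / 10 = 0 then Nat.digitChar (n % 10) :: ds
      else Nat.toDigitsCore 10 f (n / 10) (Nat.digitChar (n % 10) :: ds) := by
  rfl

lemma pv_core_spec : ∀ (n : Nat), ∀ (f : Nat) (ds : List Char), n < f →
    Nat.toDigitsCore 10 f n ds = Nat.toDigits 10 n ++ ds := by
  intro n
  induction n using Nat.strong_induction_on with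
  | _ n ih =>
    intro f ds hf
    match f with
    | f + 1 =>
      rw [pv_core_succ]
      by_cases h0 : n / 10 = 0
      · rw [if_pos h0, Nat.toDigits, pv_core_succ, if_pos h0]
        simp
      · have hlt : n / 10 < n := Nat.div_lt_self (by omega) (by omega)
        rw [if_neg h0]
        conv_rhs => rw [Nat.toDigits, pv_core_succ, if_neg h0]
        rw [ih (n / 10) hlt n _ (by omega), ih (n / 10) hlt f _ (by omega)]
        simp

lemma pv_shape (n : Nat) :
    Nat.toDigits 10 n =
      if n < 10 then [Nat.digitChar n]
      else Nat.toDigits 10 (n / 10) ++ [Nat.digitChar (n % 10)] := by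
  by_cases h : n < 10
  · have h0 : n / 10 = 0 := by omega
    have hm : n % 10 = n := by omega
    rw [Nat.toDigits, pv_core_succ, if_pos h0, if_pos h, hm]
  · have h0 : ¬ n / 10 = 0 := by omega
    rw [Nat.toDigits, pv_core_succ, if_neg h0, if_neg h,
      pv_core_spec (n / 10) n _ (by omega)]

lemma pv_toDigits_ne_nil (n : Nat) : Nat.toDigits 10 n ≠ [] := by
  rw [pv_shape]
  split_ifs <;> simp

lemma pv_digitChar_inj : ∀ x y : Nat, x < 10 → y < 10 → Nat.digitChar x = Nat.digitChar y → x = y := by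
  intro x y hx hy
  interval_cases x <;> interval_cases y <;> decide

lemma pv_digitChar_ne_dash : ∀ d : Nat, d < 10 → Nat.digitChar d ≠ '-' := by
  intro d h
  interval_cases d <;> decide

lemma pv_toDigits_head : ∀ n : Nat, ∃ d, d < 10 ∧ (Nat.toDigits 10 n).head? = some (Nat.digitChar d) := by
  intro n
  induction n using Nat.strong_induction_on with
  | _ n ih =>
    rw [pv_shape]
    by_cases h : n < 10
    · exact ⟨n, h, by rw [if_pos h]; rfl⟩
    · rw [if_neg h]
      obtain ⟨d, hd, hh⟩ := ih (n / 10) (Nat.div_lt_self (by omega) (by omega))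
      rcases List.exists_cons_of_ne_nil (pv_toDigits_ne_nil (n / 10)) with ⟨c, cs, hc⟩
      rw [hc] at hh ⊢
      simp at hh ⊢
      exact ⟨d, hd, hh⟩

lemma pv_toDigits_inj : ∀ a b : Nat, Nat.toDigits 10 a = Nat.toDigits 10 b → a = b := by
  intro a
  induction a using Nat.strong_induction_on with
  | _ a ih =>
    intro b h
    rw [pv_shape a, pv_shape b] at h
    split_ifs at h with ha hb hb
    · simp only [List.cons.injEq] at h
      exact pv_digitChar_inj _ _ ha hb h.1
    · rcases List.exists_cons_of_ne_nil (pv_toDigits_ne_nil (b / 10)) with ⟨c, cs, hc⟩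
      rw [hc] at h
      simp at h
    · rcases List.exists_cons_of_ne_nil (pv_toDigits_ne_nil (a / 10)) with ⟨c, cs, hc⟩
      rw [hc] at h
      simp at h
    · have h2 := congrArg List.reverse h
      simp only [List.reverse_append, List.reverse_cons, List.reverse_nil, List.nil_append,
        List.cons_append, List.cons.injEq] at h2
      have hmod : a % 10 = b % 10 :=
        pv_digitChar_inj _ _ (by omega) (by omega) h2.1
      have hdiv : a / 10 = b / 10 := by
        apply ih (a / 10) (Nat.div_lt_self (by omega) (by omega))
        have := congrArg List.reverse h2.2
        simpa using this
      omega

lemma pv_toChars_inj : ∀ a b : Int, PySem.Int.toChars a = PySem.Int.toChars b → a = b := by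
  intro a b h
  simp only [PySem.Int.toChars] at h
  split_ifs at h with ha hb hb
  · simp only [List.cons.injEq] at h
    have := pv_toDigits_inj _ _ h.2
    omega
  · obtain ⟨d, hd, hh⟩ := pv_toDigits_head b.toNat
    rw [← h] at hh
    simp at hh
    exact absurd hh.symm (pv_digitChar_ne_dash d hd)
  · obtain ⟨d, hd, hh⟩ := pv_toDigits_head a.toNat
    rw [h] at hh
    simp at hh
    exact absurd hh.symm (pv_digitChar_ne_dash d hd)
  · have := pv_toDigits_inj _ _ h
    omega

lemma pv_name_inj : ∀ a b : Int,
    ("f_PlaceGroup" ++ PySem.Int.toStr a) = ("f_PlaceGroup" ++ PySem.Int.toStr b) → a = b := by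
  intro a b h
  have h2 := congrArg String.toList h
  rw [String.toList_append, String.toList_append] at h2
  have h3 := List.append_cancel_left h2
  rw [PySem.Int.toList_toStr, PySem.Int.toList_toStr] at h3
  exact pv_toChars_inj _ _ h3

lemma pv_names_nodup (compat_clusters : List (List String × List String)) :
    ((PySem.List.enumerate compat_clusters 0).map
      (fun gp => "f_PlaceGroup" ++ PySem.Int.toStr gp.1)).Nodup := by
  have hp := PySem.List.pairwise_lt_enumerate compat_clusters 0
  unfold List.Nodup
  refine List.Pairwise.map _ ?_ hp
  intro p q hlt hEq
  exact absurd (pv_name_inj _ _ hEq) (ne_of_lt hlt)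

-- ---- characterisation of A's comp_features dict ----

lemma pv_compFeatures_items (compat_clusters : List (List String × List String)) :
    (pvA_compFeatures compat_clusters).items =
      (PySem.List.enumerate compat_clusters 0).map
        (fun gp => ("f_PlaceGroup" ++ PySem.Int.toStr gp.1,
          PySem.Set.update (PySem.Set.ofList gp.2.1) gp.2.2)) := by
  unfold pvA_compFeatures
  have h := PySem.Dict.items_foldl_insert_fresh
    (l := PySem.List.enumerate compat_clusters 0)
    (k := fun gp => "f_PlaceGroup" ++ PySem.Int.toStr gp.1)
    (v := fun gp => PySem.Set.update (PySem.Set.ofList gp.2.1) gp.2.2)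
    (d := PySem.Dict.empty)
    (by intro a _; exact PySem.Dict.contains_empty _)
    (pv_names_nodup compat_clusters)
  simpa using h

lemma pv_compFeatures_keys (compat_clusters : List (List String × List String)) :
    (pvA_compFeatures compat_clusters).keys =
      (PySem.List.enumerate compat_clusters 0).map
        (fun gp => "f_PlaceGroup" ++ PySem.Int.toStr gp.1) := by
  simp only [PySem.Dict.keys, pv_compFeatures_items, List.map_map]
  rfl

-- ---- set membership for A's positive_ents ----

lemma pv_mem_update : ∀ (xs : List String) (s : PySem.Set String) (y : String),
    y ∈ PySem.Set.update s xs ↔ y ∈ s ∨ y ∈ xs := by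
  intro xs
  induction xs with
  | nil => intro s y; simp [PySem.Set.update]
  | cons x xs ih =>
    intro s y
    simp only [PySem.Set.update, List.foldl_cons] at ih ⊢
    rw [ih]
    simp [PySem.Set.mem_add, List.mem_cons]
    tauto

lemma pv_contains_update (o r : List String) (t : String) :
    PySem.Set.contains (PySem.Set.update (PySem.Set.ofList o) r) t = decide (t ∈ o ++ r) := by
  have hm : t ∈ PySem.Set.update (PySem.Set.ofList o) r ↔ t ∈ o ++ r := by
    rw [pv_mem_update, PySem.Set.mem_ofList, List.mem_append]
  rw [Bool.eq_iff_iff]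
  simp only [decide_eq_true_eq, ← hm]
  simp [PySem.Set.contains, List.contains_iff_mem]

-- ---- the matching feature-name list of one obj_type, in group order ----

def pvFeatsOf (compat_clusters : List (List String × List String)) (t : String) : List String :=
  ((PySem.List.enumerate compat_clusters 0).filter
    (fun gp => decide (t ∈ gp.2.1 ++ gp.2.2))).map
    (fun gp => "f_PlaceGroup" ++ PySem.Int.toStr gp.1)

lemma pv_featsOf_nodup (compat_clusters : List (List String × List String)) (t : String) :
    (pvFeatsOf compat_clusters t).Nodup := by
  unfold pvFeatsOf
  exact List.Nodup.sublist (List.Sublist.map _ List.filter_sublist) (pv_names_nodup compat_clusters)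

-- ---- A's inner feature scan = fold over the matching feature names ----

lemma pv_if_filter : ∀ (l : List (Int × (List String × List String))) (t e : String)
    (inner : PySem.Dict String (List String)),
    (l.map (fun gp => ("f_PlaceGroup" ++ PySem.Int.toStr gp.1,
        PySem.Set.update (PySem.Set.ofList gp.2.1) gp.2.2))).foldl
      (fun inner p => if PySem.Set.contains p.2 t then inner.modify p.1 [] (· ++ [e]) else inner) inner
    = ((l.filter (fun gp => decide (t ∈ gp.2.1 ++ gp.2.2))).map
        (fun gp => "f_PlaceGroup" ++ PySem.Int.toStr gp.1)).foldl
        (fun inner f => inner.modify f [] (· ++ [e])) inner := by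
  intro l t e
  induction l with
  | nil => intro inner; rfl
  | cons gp l ih =>
    intro inner
    simp only [List.map_cons, List.foldl_cons, List.filter_cons, pv_contains_update]
    by_cases hm : t ∈ gp.2.1 ++ gp.2.2
    · simp only [hm, decide_true, if_true, List.map_cons, List.foldl_cons]
      exact ih _
    · simp only [hm, decide_false, if_false, Bool.false_eq_true]
      exact ih _

-- ---- a Nodup list filtered for one element ----

lemma pv_filter_beq_nodup (f : String) :
    ∀ (xs : List String), xs.Nodup →
      xs.filter (fun x => x == f) = if f ∈ xs then [f] else [] := by
  intro xs
  induction xs with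
  | nil => intro _; simp
  | cons x xs ih =>
    intro hnd
    rw [List.nodup_cons] at hnd
    by_cases hx : x = f
    · subst hx
      simp [List.filter_cons, ih hnd.2, hnd.1]
    · simp only [List.filter_cons, beq_iff_eq, hx, if_false, List.mem_cons]
      rw [ih hnd.2]
      simp [Ne.symm hx]

-- ---- one cluster's dedup loop, seen through getD ----

lemma pv_dedup_modify_getD (nm : String) (m : List String)
    (d : PySem.Dict String (List String)) (t : String) :
    ((PySem.List.dedup m).foldl (fun d u => d.modify u [] (· ++ [nm])) d).getD t []
      = d.getD t [] ++ (if t ∈ m then [nm] else []) := by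
  have h1 : (PySem.List.dedup m).foldl (fun d u => d.modify u [] (· ++ [nm])) d
      = ((PySem.List.dedup m).map (fun u => (u, nm))).foldl
          (fun d p => d.modify p.1 [] (· ++ [p.2])) d := by
    rw [List.foldl_map]
  rw [h1, PySem.Dict.getD_foldl_modify_append, List.filter_map]
  have h2 : ((fun p : String × String => p.1 == t) ∘ fun u => (u, nm)) = fun u => u == t := rfl
  rw [h2, pv_filter_beq_nodup t _ (PySem.List.nodup_dedup m)]
  by_cases hm : t ∈ m
  · simp [PySem.List.mem_dedup, hm]
  · simp [PySem.List.mem_dedup, hm]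

-- ---- B's type_feats fold over an arbitrary (name, cluster) list ----

lemma pv_tf_fold (t : String) :
    ∀ (L : List (Int × (List String × List String))) (d : PySem.Dict String (List String)),
    ((L.map (fun gp => ("f_PlaceGroup" ++ PySem.Int.toStr gp.1, gp.2))).foldl
      (fun tf nc => (PySem.List.dedup (nc.2.1 ++ nc.2.2)).foldl
        (fun tf u => tf.modify u [] (· ++ [nc.1])) tf) d).getD t []
    = d.getD t [] ++ ((L.filter (fun gp => decide (t ∈ gp.2.1 ++ gp.2.2))).map
        (fun gp => "f_PlaceGroup" ++ PySem.Int.toStr gp.1)) := by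
  intro L
  induction L with
  | nil => intro d; simp
  | cons gp L ih =>
    intro d
    simp only [List.map_cons, List.foldl_cons, List.filter_cons]
    rw [ih, pv_dedup_modify_getD]
    by_cases hm : t ∈ gp.2.1 ++ gp.2.2
    · simp [hm, List.append_assoc]
    · simp [hm]

-- ---- the zipped cluster list B folds over, as a map over enumerate ----

lemma pv_range_zip (nmf : Int → String) :
    ∀ (l : List (List String × List String)) (i : Int),
    ((PySem.List.pyRange i (i + l.length)).map nmf).zip l
      = (PySem.List.enumerate l i).map (fun gp => (nmf gp.1, gp.2)) := by
  intro l
  induction l with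
  | nil => intro i; simp [PySem.List.pyRange]
  | cons c l ih =>
    intro i
    have hb : i + ((c :: l).length : Int) = (i + 1) + l.length := by
      simp; ring
    rw [hb, PySem.List.pyRange_one_cons (by omega)]
    simp only [List.map_cons, List.zip_cons_cons, PySem.List.enumerate]
    rw [ih (i + 1)]

lemma pv_typeFeats_getD (compat_clusters : List (List String × List String)) (t : String) :
    (pvB_typeFeats compat_clusters).getD t [] = pvFeatsOf compat_clusters t := by
  unfold pvB_typeFeats pvB_featNames pvFeatsOf
  have h0 : (0 : Int) + compat_clusters.length = compat_clusters.length := by ring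
  rw [← h0, pv_range_zip, pv_tf_fold]
  simp

-- ---- the nested modify fold over entities (A's shape), characterised ----

lemma pv_blk_getD (F : String → List String) (hF : ∀ e, (F e).Nodup) (f : String) :
    ∀ (entities : List String) (d : PySem.Dict String (List String)),
    (entities.foldl (fun d e => (F e).foldl (fun d g => d.modify g [] (· ++ [e])) d) d).getD f []
      = d.getD f [] ++ entities.filter (fun e => decide (f ∈ F e)) := by
  intro entities
  induction entities with
  | nil => intro d; simp
  | cons e es ih =>
    intro d
    simp only [List.foldl_cons, List.filter_cons]
    rw [ih]
    have h1 : (F e).foldl (fun d g => d.modify g [] (· ++ [e])) d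
        = ((F e).map (fun g => (g, e))).foldl (fun d p => d.modify p.1 [] (· ++ [p.2])) d := by
      rw [List.foldl_map]
    rw [h1, PySem.Dict.getD_foldl_modify_append, List.filter_map]
    have h2 : ((fun p : String × String => p.1 == f) ∘ fun g => (g, e)) = fun g => g == f := rfl
    rw [h2, pv_filter_beq_nodup f _ (hF e)]
    by_cases hm : f ∈ F e
    · simp [hm, List.append_assoc]
    · simp [hm]

lemma pv_blk_keys (F : String → List String) :
    ∀ (entities : List String) (d : PySem.Dict String (List String)),
    (entities.foldl (fun d e => (F e).foldl (fun d g => d.modify g [] (· ++ [e])) d) d).keys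
      = PySem.Set.update d.keys (entities.flatMap F) := by
  intro entities
  induction entities with
  | nil => intro d; simp [PySem.Set.update]
  | cons e es ih =>
    intro d
    simp only [List.foldl_cons, List.flatMap_cons]
    rw [ih, PySem.Set.update_append,
      PySem.Dict.keys_foldl_modify (l := F e) (d0 := []) (f := fun _ _ => (· ++ [e]))]

lemma pv_blk_items (F : String → List String) (hF : ∀ e, (F e).Nodup) (entities : List String) :
    (entities.foldl (fun d e => (F e).foldl (fun d g => d.modify g [] (· ++ [e])) d)
        PySem.Dict.empty).items
      = (PySem.Set.ofList (entities.flatMap F)).map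
          (fun f => (f, entities.filter (fun e => decide (f ∈ F e)))) := by
  have hkeys : (entities.foldl (fun d e => (F e).foldl (fun d g => d.modify g [] (· ++ [e])) d)
      PySem.Dict.empty).keys = PySem.Set.ofList (entities.flatMap F) := by
    rw [pv_blk_keys]
    have : (PySem.Dict.empty : PySem.Dict String (List String)).keys = [] := rfl
    rw [this, PySem.Set.update_nil_left]
  have hnd : (entities.foldl (fun d e => (F e).foldl (fun d g => d.modify g [] (· ++ [e])) d)
      PySem.Dict.empty).keys.Nodup := by
    rw [hkeys]; exact PySem.Set.nodup_ofList _
  rw [PySem.Dict.items_eq_map_keys _ hnd [], hkeys]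
  apply List.map_congr_left
  intro f _
  rw [pv_blk_getD F hF f entities PySem.Dict.empty, PySem.Dict.getD_empty]
  simp

-- ---- B's per-floorplan dict, characterised the same way ----

lemma pv_compat_items (F : String → List String) (entities : List String) :
    (pvB_compat (entities.map (fun e => (e, F e)))).items
      = (PySem.Set.ofList (entities.flatMap F)).map
          (fun f => (f, entities.filter (fun e => decide (f ∈ F e)))) := by
  unfold pvB_compat
  have hflat : (entities.map (fun e => (e, F e))).flatMap (fun p => p.2) = entities.flatMap F := by
    rw [List.flatMap_map]
  rw [hflat, PySem.List.dedup_eq_ofList]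
  have h := PySem.Dict.items_foldl_insert_fresh
    (l := PySem.Set.ofList (entities.flatMap F))
    (k := fun f => f)
    (v := fun f => (((entities.map (fun e => (e, F e))).filter (fun p => p.2.contains f)).map (fun p => p.1)))
    (d := PySem.Dict.empty)
    (by intro a _; exact PySem.Dict.contains_empty _)
    (by simpa using PySem.Set.nodup_ofList (entities.flatMap F))
  rw [h]
  simp only [List.nil_append]
  apply List.map_congr_left
  intro f _
  have hfil : (entities.map (fun e => (e, F e))).filter (fun p => p.2.contains f)
      = (entities.filter (fun e => (F e).contains f)).map (fun e => (e, F e)) := by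
    rw [List.filter_map]; rfl
  rw [hfil, List.map_map]
  have hcomp : ((fun p : String × List String => p.1) ∘ fun e => (e, F e)) = id := rfl
  rw [hcomp, List.map_id]
  congr 1
  apply List.filter_congr
  intro e _
  rw [Bool.eq_iff_iff]
  simp [List.contains_iff_mem]

-- ---- the per-floorplan dicts agree ----

lemma pv_inner_eq (compat_clusters : List (List String × List String)) (entities : List String) :
    (pvA_floorplanCompat (pvA_compFeatures compat_clusters).items entities).items =
      (pvB_compat (pvB_pairs (pvB_typeFeats compat_clusters) entities)).items := by
  unfold pvA_floorplanCompat pvB_pairs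
  have hstep : (fun (inner : PySem.Dict String (List String)) (entity : String) =>
      (pvA_compFeatures compat_clusters).items.foldl
        (fun inner p =>
          if PySem.Set.contains p.2 (pvObjType entity) then inner.modify p.1 [] (· ++ [entity]) else inner) inner)
      = (fun (d : PySem.Dict String (List String)) (e : String) =>
          (pvFeatsOf compat_clusters (pvObjType e)).foldl (fun d g => d.modify g [] (· ++ [e])) d) := by
    funext inner entity
    rw [pv_compFeatures_items, pv_if_filter]
    rfl
  rw [hstep]
  have hFd : (fun e => (pvB_typeFeats compat_clusters).getD (pvObjType e) [])
      = fun e => pvFeatsOf compat_clusters (pvObjType e) := by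
    funext e; rw [pv_typeFeats_getD]
  rw [show (entities.map (fun e => (e, (pvB_typeFeats compat_clusters).getD (pvObjType e) [])))
      = entities.map (fun e => (e, pvFeatsOf compat_clusters (pvObjType e))) by
    apply List.map_congr_left; intro e _; rw [pv_typeFeats_getD]]
  rw [pv_compat_items (fun e => pvFeatsOf compat_clusters (pvObjType e)),
    pv_blk_items (fun e => pvFeatsOf compat_clusters (pvObjType e))
      (fun e => pv_featsOf_nodup compat_clusters (pvObjType e))]

-- ---- the sorted feature-name lists agree ----

lemma pv_featNames_eq (compat_clusters : List (List String × List String)) :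
    pvB_featNames compat_clusters =
      (PySem.List.enumerate compat_clusters 0).map
        (fun gp => "f_PlaceGroup" ++ PySem.Int.toStr gp.1) := by
  unfold pvB_featNames
  have h0 : (0 : Int) + compat_clusters.length = (compat_clusters.length : Int) := by ring
  have h := congrArg (fun l => l.map Prod.fst)
    (pv_range_zip (fun g => "f_PlaceGroup" ++ PySem.Int.toStr g) compat_clusters 0)
  rw [h0] at h
  simpa [List.map_fst_zip, List.map_map, Function.comp] using h

-- ===== VERDICT (by name: the statement is the Claim_ definition above) =====
theorem construct_compat_features_spec : Claim_equal_construct_compat_features := by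
  intro fp_to_entity fp_to_feature_positives compat_clusters _
  unfold Spec_construct_compat_features
  unfold construct_compat_features construct_compat_features_alt
  rw [Prod.mk.injEq]
  constructor
  · rw [pv_compFeatures_keys, pv_featNames_eq]
  · rw [PySem.List.foldl_append_singleton_eq_map]
    simp only [List.nil_append]
    apply List.map_congr_left
    intro fe _
    rw [pv_inner_eq]
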